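-- pv_equiv track=rewrite | github.com/bcsnpc/semantic-test | src/semantic_test/cli/commands/exposure.py | _merge_unresolved_refs
-- ===== SOURCE A (Python) =====
-- from typing import Any
--
-- def _merge_unresolved_refs(
--     before: list[dict[str, Any]],
--     after: list[dict[str, Any]],
-- ) -> list[dict[str, str]]:
--     merged: set[tuple[str, str]] = set()
--     for entry in before + after:
--         object_id = str(entry.get("object_id", ""))
--         ref = str(entry.get("ref", ""))
--         if object_id and ref:
--             merged.add((object_id, ref))
--     return [
--         {"object_id": object_id, "ref": ref}
--         for object_id, ref in sorted(merged)
--     ]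
-- ===== SOURCE B (Python) =====
-- def _merge_unresolved_refs(before, after):
--     ordered = []  # kept sorted and duplicate-free at all times
--     for entry in before + after:
--         object_id = str(entry.get("object_id", ""))
--         ref = str(entry.get("ref", ""))
--         if object_id and ref:
--             pair = (object_id, ref)
--             i = 0
--             while i < len(ordered) and ordered[i] < pair:
--                 i += 1
--             if i == len(ordered) or ordered[i] != pair:
--                 ordered.insert(i, pair)
--     return [{"object_id": object_id, "ref": ref} for object_id, ref in ordered]
-- ===== Notes on version B (the rewrite author's own statement) =====
-- stated objective: alternative
-- what changed: B never builds a set and never calls sorted(): it maintains a sorted, duplicate-free accumulator and inserts each valid (object_id, ref) pair at its ordered position (skipping it if already present) in a single pass, so the final list is already sorted and unique.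
import Mathlib
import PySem

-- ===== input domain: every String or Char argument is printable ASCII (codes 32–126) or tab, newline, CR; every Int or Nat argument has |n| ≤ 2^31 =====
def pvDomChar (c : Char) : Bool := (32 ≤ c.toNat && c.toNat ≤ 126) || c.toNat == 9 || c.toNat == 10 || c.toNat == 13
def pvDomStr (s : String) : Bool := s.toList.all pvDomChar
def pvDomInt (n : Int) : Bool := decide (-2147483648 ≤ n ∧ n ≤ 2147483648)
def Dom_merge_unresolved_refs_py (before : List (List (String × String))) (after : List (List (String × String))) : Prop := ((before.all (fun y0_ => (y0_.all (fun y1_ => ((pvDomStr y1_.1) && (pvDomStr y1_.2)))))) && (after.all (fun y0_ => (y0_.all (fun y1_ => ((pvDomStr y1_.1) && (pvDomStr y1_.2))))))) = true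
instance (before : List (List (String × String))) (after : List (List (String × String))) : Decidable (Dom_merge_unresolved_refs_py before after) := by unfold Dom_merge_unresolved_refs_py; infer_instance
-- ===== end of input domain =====

-- B replaces A's build-a-set-then-sort with a single pass that keeps a sorted duplicate-free
-- accumulator via ordered insertion (no set, no sort call) — an alternative algorithm, same result.

-- ===== PORT A =====
-- for entry in before + after: add (object_id, ref) to the set when both are truthy; then sorted(set) → dicts
def merge_unresolved_refs_py (before : List (List (String × String))) (after : List (List (String × String))) : List (List (String × String)) :=
  let merged : PySem.Set (String × String) :=
    (before ++ after).foldl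
      (fun merged entry =>
        let object_id := PySem.Dict.getD ⟨entry⟩ "object_id" ""
        let ref := PySem.Dict.getD ⟨entry⟩ "ref" ""
        if object_id ≠ "" ∧ ref ≠ "" then PySem.Set.add merged (object_id, ref) else merged)
      PySem.Set.empty
  -- sorted(merged): Python's lexicographic tuple order = the Lex order on pairs (toLex is an injective key)
  (PySem.List.sorted merged (fun p => toLex p)).map
    (fun p => [("object_id", p.1), ("ref", p.2)])

-- ===== PORT B =====
-- Source B's inner while/insert: walk past the elements < pair, then insert unless it is already there
def pvInsertOrdered (p : String × String) : List (String × String) → List (String × String)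
  | [] => [p]
  | q :: rest =>
    if toLex q < toLex p then q :: pvInsertOrdered p rest
    else if q = p then q :: rest
    else p :: q :: rest

def merge_unresolved_refs_py_alt (before : List (List (String × String))) (after : List (List (String × String))) : List (List (String × String)) :=
  let ordered :=
    (before ++ after).foldl
      (fun ordered entry =>
        let object_id := PySem.Dict.getD ⟨entry⟩ "object_id" ""
        let ref := PySem.Dict.getD ⟨entry⟩ "ref" ""
        if object_id ≠ "" ∧ ref ≠ "" then pvInsertOrdered (object_id, ref) ordered else ordered)
      []
  ordered.map (fun p => [("object_id", p.1), ("ref", p.2)])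

-- ===== PRECONDITION & SPEC =====
def Spec_merge_unresolved_refs_py (before : List (List (String × String))) (after : List (List (String × String))) (out : List (List (String × String))) : Prop := out = merge_unresolved_refs_py_alt before after
instance (before : List (List (String × String))) (after : List (List (String × String))) (out : List (List (String × String))) : Decidable (Spec_merge_unresolved_refs_py before after out) := by unfold Spec_merge_unresolved_refs_py; infer_instance

-- ===== CLAIM =====
def Claim_equal_merge_unresolved_refs_py : Prop := ∀ (before : List (List (String × String))) (after : List (List (String × String))), Dom_merge_unresolved_refs_py before after → Spec_merge_unresolved_refs_py before after (merge_unresolved_refs_py before after)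

-- ===== LEMMAS AND PROOFS =====

theorem pv_insert_mem (p : String × String) (L : List (String × String)) :
    ∀ x, x ∈ pvInsertOrdered p L ↔ x = p ∨ x ∈ L := by
  induction L with
  | nil => intro x; simp [pvInsertOrdered]
  | cons q rest ih =>
    intro x
    by_cases h1 : toLex q < toLex p
    · simp only [pvInsertOrdered, if_pos h1, List.mem_cons, ih x]
      tauto
    · by_cases h2 : q = p
      · subst h2; simp [pvInsertOrdered, List.mem_cons]
      · simp [pvInsertOrdered, if_neg h1, if_neg h2, List.mem_cons]

theorem pv_insert_pairwise (p : String × String) (L : List (String × String))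
    (h : L.Pairwise (fun a b => toLex a < toLex b)) :
    (pvInsertOrdered p L).Pairwise (fun a b => toLex a < toLex b) := by
  induction L with
  | nil => simp [pvInsertOrdered]
  | cons q rest ih =>
    have hhead : ∀ y ∈ rest, toLex q < toLex y := (List.pairwise_cons.mp h).1
    have hrest : rest.Pairwise (fun a b => toLex a < toLex b) := (List.pairwise_cons.mp h).2
    by_cases h1 : toLex q < toLex p
    · simp only [pvInsertOrdered, if_pos h1]
      refine List.pairwise_cons.mpr ⟨?_, ih hrest⟩
      intro x hx
      rcases (pv_insert_mem p rest x).mp hx with rfl | hx'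
      · exact h1
      · exact hhead x hx'
    · by_cases h2 : q = p
      · simpa [pvInsertOrdered, if_neg h1, h2] using h
      · have hpq : toLex p < toLex q := by
          rcases lt_or_eq_of_le (le_of_not_gt h1) with hlt | heq
          · exact hlt
          · exact absurd (toLex.injective heq).symm h2
        simp only [pvInsertOrdered, if_neg h1, if_neg h2]
        refine List.pairwise_cons.mpr ⟨?_, h⟩
        intro x hx
        rcases List.mem_cons.mp hx with rfl | hx'
        · exact hpq
        · exact lt_trans hpq (hhead x hx')

-- proof-side helper: the multiset of valid pairs, in traversal order
def pvCollectPairs (entries : List (List (String × String))) : List (String × String) :=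
  entries.foldl
    (fun pairs entry =>
      let object_id := PySem.Dict.getD ⟨entry⟩ "object_id" ""
      let ref := PySem.Dict.getD ⟨entry⟩ "ref" ""
      if object_id ≠ "" ∧ ref ≠ "" then pairs ++ [(object_id, ref)] else pairs)
    []

-- A's set accumulator is the ofList of the collected pairs (same guard, same traversal)
theorem pv_fold_set_eq_ofList (entries : List (List (String × String))) :
    ∀ acc : List (String × String),
      entries.foldl
        (fun merged entry =>
          let object_id := PySem.Dict.getD ⟨entry⟩ "object_id" ""
          let ref := PySem.Dict.getD ⟨entry⟩ "ref" ""
          if object_id ≠ "" ∧ ref ≠ "" then PySem.Set.add merged (object_id, ref) else merged)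
        (PySem.Set.ofList acc)
      = PySem.Set.ofList
        (entries.foldl
          (fun pairs entry =>
            let object_id := PySem.Dict.getD ⟨entry⟩ "object_id" ""
            let ref := PySem.Dict.getD ⟨entry⟩ "ref" ""
            if object_id ≠ "" ∧ ref ≠ "" then pairs ++ [(object_id, ref)] else pairs)
          acc) := by
  induction entries with
  | nil => intro acc; rfl
  | cons e rest ih =>
    intro acc
    simp only [List.foldl_cons]
    by_cases h : PySem.Dict.getD (⟨e⟩ : PySem.Dict String String) "object_id" "" ≠ "" ∧ PySem.Dict.getD (⟨e⟩ : PySem.Dict String String) "ref" "" ≠ ""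
    · simp only [if_pos h, ← PySem.Set.ofList_append_singleton]
      exact ih _
    · simp only [if_neg h]
      exact ih acc

-- B's accumulator stays sorted-unique and holds exactly the pairs collected so far
theorem pv_fold_inv (entries : List (List (String × String))) :
    ∀ (L C : List (String × String)),
      L.Pairwise (fun a b => toLex a < toLex b) → (∀ x, x ∈ L ↔ x ∈ C) →
      (entries.foldl
        (fun ordered entry =>
          let object_id := PySem.Dict.getD ⟨entry⟩ "object_id" ""
          let ref := PySem.Dict.getD ⟨entry⟩ "ref" ""
          if object_id ≠ "" ∧ ref ≠ "" then pvInsertOrdered (object_id, ref) ordered else ordered)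
        L).Pairwise (fun a b => toLex a < toLex b)
      ∧ ∀ x,
        x ∈ entries.foldl
          (fun ordered entry =>
            let object_id := PySem.Dict.getD ⟨entry⟩ "object_id" ""
            let ref := PySem.Dict.getD ⟨entry⟩ "ref" ""
            if object_id ≠ "" ∧ ref ≠ "" then pvInsertOrdered (object_id, ref) ordered else ordered)
          L
        ↔ x ∈ entries.foldl
            (fun pairs entry =>
              let object_id := PySem.Dict.getD ⟨entry⟩ "object_id" ""
              let ref := PySem.Dict.getD ⟨entry⟩ "ref" ""
              if object_id ≠ "" ∧ ref ≠ "" then pairs ++ [(object_id, ref)] else pairs)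
            C := by
  induction entries with
  | nil => intro L C h1 h2; exact ⟨h1, h2⟩
  | cons e rest ih =>
    intro L C h1 h2
    simp only [List.foldl_cons]
    by_cases h : PySem.Dict.getD (⟨e⟩ : PySem.Dict String String) "object_id" "" ≠ "" ∧ PySem.Dict.getD (⟨e⟩ : PySem.Dict String String) "ref" "" ≠ ""
    · simp only [if_pos h]
      refine ih _ _ (pv_insert_pairwise _ _ h1) ?_
      intro x
      rw [pv_insert_mem, h2 x, List.mem_append, List.mem_singleton]
      tauto
    · simp only [if_neg h]
      exact ih _ _ h1 h2

-- ===== VERDICT =====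
theorem merge_unresolved_refs_py_spec : Claim_equal_merge_unresolved_refs_py := by
  intro before after _
  unfold Spec_merge_unresolved_refs_py
  show merge_unresolved_refs_py before after = merge_unresolved_refs_py_alt before after
  have hfold :
      (before ++ after).foldl
        (fun merged entry =>
          let object_id := PySem.Dict.getD ⟨entry⟩ "object_id" ""
          let ref := PySem.Dict.getD ⟨entry⟩ "ref" ""
          if object_id ≠ "" ∧ ref ≠ "" then PySem.Set.add merged (object_id, ref) else merged)
        PySem.Set.empty
      = PySem.Set.ofList (pvCollectPairs (before ++ after)) :=
    pv_fold_set_eq_ofList (before ++ after) []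
  obtain ⟨hpw, hmem⟩ := pv_fold_inv (before ++ after) [] [] List.Pairwise.nil (by simp)
  simp only [merge_unresolved_refs_py, merge_unresolved_refs_py_alt]
  rw [hfold]
  set L := (before ++ after).foldl
      (fun ordered entry =>
        let object_id := PySem.Dict.getD ⟨entry⟩ "object_id" ""
        let ref := PySem.Dict.getD ⟨entry⟩ "ref" ""
        if object_id ≠ "" ∧ ref ≠ "" then pvInsertOrdered (object_id, ref) ordered else ordered)
      [] with hL
  have hnodup : L.Nodup :=
    hpw.imp (fun {a b} h => fun e => (ne_of_lt h) (congrArg toLex e))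
  have hperm : L.Perm (PySem.Set.ofList (pvCollectPairs (before ++ after))) := by
    rw [List.perm_ext_iff_of_nodup hnodup (PySem.Set.nodup_ofList _)]
    intro a
    rw [PySem.Set.mem_ofList, hmem a]
    rfl
  have hsorted :
      PySem.List.sorted (PySem.Set.ofList (pvCollectPairs (before ++ after))) (fun p => toLex p) = L :=
    PySem.List.sorted_eq_of_perm_of_pairwise_lt _ _ _ hperm hpw
  rw [hsorted]
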